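-- pv_equiv track=rewrite | github.com/Patxi91/CodeWars_Cloud | 6kyu-Back and forth then Reverse-Patxi.py | arrange1
-- ===== SOURCE A (Python) =====
-- def arrange1(s):
--     t = []
--     sc = s.copy()
--     while sc:
--         try:
--             t.append(sc[0])
--             t.append(sc[-1])
--             sc = [x for x in reversed(sc[1:-1])]
--         except:
--             break
--     return t
-- ===== SOURCE B (Python) =====
-- def arrange1(s):
--     # Two-pointer single pass: round k takes the pair (s[i], s[j]) outside-in,
--     # in forward order on even rounds and swapped on odd rounds (the per-round
--     # reversal in the original); a lone middle element is emitted twice.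
--     t = []
--     i, j, k = 0, len(s) - 1, 0
--     while i <= j:
--         if k % 2 == 0:
--             t.append(s[i])
--             t.append(s[j])
--         else:
--             t.append(s[j])
--             t.append(s[i])
--         i += 1
--         j -= 1
--         k += 1
--     return t
-- ===== Notes on version B (the rewrite author's own statement) =====
-- stated objective: faster
-- what changed: Replaces the repeated copy-reverse-slice of the remaining list each round with a single two-pointer pass over the original list, alternating pair order by round parity.
import Mathlib
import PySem

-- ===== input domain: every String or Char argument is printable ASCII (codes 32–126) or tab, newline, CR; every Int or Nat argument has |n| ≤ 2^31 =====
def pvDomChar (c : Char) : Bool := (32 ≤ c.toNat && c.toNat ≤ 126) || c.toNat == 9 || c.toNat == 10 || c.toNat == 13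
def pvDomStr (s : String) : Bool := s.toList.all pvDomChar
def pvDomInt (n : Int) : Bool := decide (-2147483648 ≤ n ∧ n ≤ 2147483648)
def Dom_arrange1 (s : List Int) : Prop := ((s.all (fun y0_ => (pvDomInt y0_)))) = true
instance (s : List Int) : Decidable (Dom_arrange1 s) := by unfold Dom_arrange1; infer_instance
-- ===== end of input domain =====

-- B replaces A's per-round copy/reverse/slice of the remaining list with one two-pointer pass (alternating pair order by round parity): asymptotically faster.


-- ===== PORT A =====
-- A's while loop: while sc: t += [sc[0], sc[-1]]; sc = list(reversed(sc[1:-1])).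
-- (the try/except can never fire: sc is nonempty inside the loop, so sc[0] and sc[-1] succeed;
-- the fall-through match arm below is that dead 'except: break')
def arrange1Loop (sc t : List Int) : List Int :=
  match h0 : PySem.List.pyGet? sc 0, PySem.List.pyGet? sc (-1) with
  | some x, some y =>
      arrange1Loop (PySem.List.slice sc (some 1) (some (-1))).reverse (t ++ [x] ++ [y])
  | _, _ => t
termination_by sc.length
decreasing_by
  cases sc with
  | nil => simp [PySem.List.pyGet?, PySem.List.pyIdx?] at h0
  | cons a rest =>
      have hl : (PySem.List.slice (a :: rest) (some 1) (some (-1))).length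
          = PySem.List.clampIdx (a :: rest).length (-1) - PySem.List.clampIdx (a :: rest).length 1 :=
        PySem.List.length_slice _ _ _
      simp only [List.length_reverse, hl, PySem.List.clampIdx_neg_one, List.length_cons]
      omega

def arrange1 (s : List Int) : List Int := arrange1Loop s []

-- ===== PORT B =====
-- Source B's loop: while i <= j, emit (s[i], s[j]) on even rounds k and (s[j], s[i]) on odd ones.
def arrange1AltLoop (s : List Int) (i j : Int) (k : Nat) (t : List Int) : List Int :=
  if i ≤ j then
    let t' := if k % 2 == 0
      then t ++ [PySem.List.pyGetD s i 0] ++ [PySem.List.pyGetD s j 0]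
      else t ++ [PySem.List.pyGetD s j 0] ++ [PySem.List.pyGetD s i 0]
    arrange1AltLoop s (i + 1) (j - 1) (k + 1) t'
  else t
termination_by (j + 1 - i).toNat
decreasing_by omega

def arrange1_alt (s : List Int) : List Int := arrange1AltLoop s 0 ((s.length : Int) - 1) 0 []

-- ===== PRECONDITION & SPEC =====
def Spec_arrange1 (s : List Int) (out : List Int) : Prop := out = arrange1_alt s
instance (s : List Int) (out : List Int) : Decidable (Spec_arrange1 s out) := by unfold Spec_arrange1; infer_instance

-- ===== CLAIM (what is proved, stated in full; the proofs are below) =====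
def Claim_equal_arrange1 : Prop := ∀ (s : List Int), Dom_arrange1 s → Spec_arrange1 s (arrange1 s)

-- ===== LEMMAS AND PROOFS =====

theorem tail_take' (l : List Int) (k : Nat) : (l.take k).tail = l.tail.take (k - 1) := by
  cases l <;> cases k <;> simp

theorem slice_one_neg_one (l : List Int) :
    PySem.List.slice l (some 1) (some (-1)) = l.dropLast.tail := by
  unfold PySem.List.slice
  simp only [PySem.List.clampIdx_neg_one]
  have h1 : PySem.List.clampIdx l.length ((1:Nat):Int) = min 1 l.length :=
    PySem.List.clampIdx_natCast _ _
  simp only [Nat.cast_one] at h1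
  rw [h1, List.dropLast_eq_take, tail_take']
  cases l with
  | nil => simp
  | cons a r => simp

theorem loopA_nil (t : List Int) : arrange1Loop [] t = t := by
  rw [arrange1Loop]
  simp [PySem.List.pyGet?_zero]

theorem loopA_step (sc t : List Int) (x y : Int)
    (hx : PySem.List.pyGet? sc 0 = some x) (hy : PySem.List.pyGet? sc (-1) = some y) :
    arrange1Loop sc t = arrange1Loop sc.dropLast.tail.reverse (t ++ [x] ++ [y]) := by
  rw [arrange1Loop]
  split
  next x' y' h0 h1 =>
    rw [hx] at h0; rw [hy] at h1
    cases h0; cases h1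
    rw [slice_one_neg_one]
  next h =>
    exact absurd (h x y hx hy) (fun f => f)

-- Invariant: when sc holds the segment s[i..j] — oriented forward on even rounds k and
-- reversed on odd ones — A's loop and B's loop agree.
theorem loops_agree : ∀ (n : Nat) (s : List Int) (i j : Int) (k : Nat) (t : List Int),
    0 ≤ i → j < (s.length : Int) → (j + 1 - i).toNat = n →
    arrange1AltLoop s i j k t
      = arrange1Loop (if k % 2 == 0 then (s.drop i.toNat).take n
                      else ((s.drop i.toNat).take n).reverse) t := by
  intro n
  induction n using Nat.strong_induction_on with
  | _ n IH =>
    intro s i j k t hi hj hn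
    rw [arrange1AltLoop]
    by_cases h : i ≤ j
    · rw [if_pos h]
      have hn1 : 1 ≤ n := by omega
      have hmn : i.toNat + n ≤ s.length := by omega
      have hmlt : i.toNat < s.length := by omega
      have hjt : j.toNat = i.toNat + n - 1 := by omega
      have hjlt : j.toNat < s.length := by omega
      set m := i.toNat with hmdef
      set seg := (s.drop m).take n with hsegdef
      have hlen : seg.length = n := by
        simp only [hsegdef, List.length_take, List.length_drop]; omega
      -- head and last of the segment
      have hx : seg[0]? = some s[m] := by
        rw [hsegdef, List.getElem?_take_of_lt (by omega), List.getElem?_drop,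
          List.getElem?_eq_getElem (by omega)]
        simp
      have hy : seg.getLast? = some s[m + n - 1] := by
        rw [List.getLast?_eq_getElem?, hlen, hsegdef,
          List.getElem?_take_of_lt (by omega), List.getElem?_drop,
          List.getElem?_eq_getElem (by omega)]
        exact congrArg some (getElem_congr rfl (by omega) (by omega))
      -- middle of the segment
      have hmid : seg.dropLast.tail = (s.drop (m + 1)).take (n - 2) := by
        rw [List.dropLast_eq_take, hlen, hsegdef, List.take_take, tail_take', List.tail_drop]
        congr 1
        omega
      have hmid' : seg.tail.dropLast = (s.drop (m + 1)).take (n - 2) := by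
        have hlt : seg.tail = (s.drop (m + 1)).take (n - 1) := by
          rw [hsegdef, tail_take', List.tail_drop]
        rw [hlt, List.dropLast_eq_take, List.length_take, List.take_take]
        congr 1
        simp only [List.length_drop]
        omega
      -- B's fetched values
      have hgi : PySem.List.pyGetD s i 0 = s[m] := by
        rw [PySem.List.pyGetD_eq_getElem s (0 : Int) hi (by omega)]
      have hgj : PySem.List.pyGetD s j 0 = s[m + n - 1] := by
        rw [PySem.List.pyGetD_eq_getElem s (0 : Int) (by omega) (by omega)]
        exact getElem_congr rfl (by omega) (by omega)
      -- recursive IH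
      have hIH := IH (n - 2) (by omega) s (i + 1) (j - 1) (k + 1)
      have hseg' : ((i : Int) + 1).toNat = m + 1 := by omega
      by_cases hk : k % 2 = 0
      · -- even round: A consumes seg forward
        have hkb : (k % 2 == 0) = true := by simp [hk]
        simp only [hkb, if_true, hgi, hgj]
        rw [hIH _ (by omega) (by omega) (by omega)]
        have hk1 : ((k + 1) % 2 == 0) = false := by simp [Nat.add_mod, hk]
        simp only [hk1, Bool.false_eq_true, if_false]
        rw [hseg']
        rw [loopA_step seg t s[m] s[m + n - 1]
          (by rw [PySem.List.pyGet?_zero]; exact hx)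
          (by rw [PySem.List.pyGet?_neg_one]; exact hy)]
        rw [hmid]
      · -- odd round: A consumes seg reversed
        have hkb : (k % 2 == 0) = false := by simp [hk]
        simp only [hkb, Bool.false_eq_true, if_false, hgi, hgj]
        rw [hIH _ (by omega) (by omega) (by omega)]
        have hk1 : ((k + 1) % 2 == 0) = true := by simp [Nat.add_mod]; omega
        simp only [hk1, if_true]
        rw [hseg']
        rw [loopA_step seg.reverse t s[m + n - 1] s[m]
          (by rw [PySem.List.pyGet?_zero, ← List.head?_eq_getElem?, List.head?_reverse]; exact hy)
          (by rw [PySem.List.pyGet?_neg_one, List.getLast?_reverse, List.head?_eq_getElem?]; exact hx)]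
        rw [List.dropLast_reverse, List.tail_reverse, List.reverse_reverse, hmid']
    · rw [if_neg h]
      have hn0 : n = 0 := by omega
      subst hn0
      simp only [List.take_zero, List.reverse_nil, ite_self, loopA_nil]

theorem arrange1_spec : Claim_equal_arrange1 := by
  intro s _
  unfold Spec_arrange1
  have h := loops_agree s.length s 0 ((s.length : Int) - 1) 0 []
    (by omega) (by omega) (by omega)
  unfold arrange1 arrange1_alt
  rw [h]
  simp
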